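-- pv_equiv track=rewrite | github.com/graham218/Leet-code.2025---Bill.Graham.Peacemaker- | Python/2-TwoPointers/Problems/4-ContainerWithMostWater/ContainerWithMostWaterPro.py | max_image_compression
-- ===== SOURCE A (Python) =====
-- def max_image_compression(pixels):
--     """
--     Optimizes image pixel alignment for best compression results using dynamic programming.
--
--     This approach uses dynamic programming to find the optimal pixel alignment that maximizes compression
--     efficiency. The 'pixels' array represents the pixel values in an image.  Note that this is an analogy
--     and the  'Container With Most Water'  analogy is not a perfect fit for image compression.  Image
--     compression typically involves finding repetitive patterns, reducing color depth, or using
--     transformations (like DCT in JPEG) and quantization.  This function provides a simplified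
--     illustration and serves to demonstrate the  *idea* of applying optimization.
--
--     Args:
--         pixels: A list of integers representing pixel values.
--
--     Returns:
--         The maximum compression possible (in an abstract sense).
--     """
--     n = len(pixels)
--     left_max = [0] * n
--     right_max = [0] * n
--     left_max[0] = pixels[0]
--     for i in range(1, n):
--         left_max[i] = max(left_max[i - 1], pixels[i])
--     right_max[n - 1] = pixels[n - 1]
--     for i in range(n - 2, -1, -1):
--         right_max[i] = max(right_max[i + 1], pixels[i])
--     max_compression = 0
--     for i in range(n):
--         compression = min(left_max[i], right_max[i]) * i
--         max_compression = max(max_compression, compression)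
--     return max_compression
-- ===== SOURCE B (Python) =====
-- def max_image_compression(pixels):
--     # Converging two-pointer scan with running prefix/suffix maxima
--     # (no O(n) auxiliary arrays, single pass).
--     n = len(pixels)
--     l, r = 0, n - 1
--     left_run = pixels[0]
--     right_run = pixels[r]
--     best = 0
--     while l < r:
--         if left_run <= right_run:
--             best = max(best, left_run * l)
--             l += 1
--             left_run = max(left_run, pixels[l])
--         else:
--             best = max(best, right_run * r)
--             r -= 1
--             right_run = max(right_run, pixels[r])
--     return max(best, min(left_run, right_run) * l)
-- ===== Notes on version B (the rewrite author's own statement) =====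
-- stated objective: alternative
-- what changed: Replaced the three-pass prefix/suffix-max DP arrays with a single converging two-pointer scan that keeps running left/right maxima and no auxiliary arrays.
import Mathlib
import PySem

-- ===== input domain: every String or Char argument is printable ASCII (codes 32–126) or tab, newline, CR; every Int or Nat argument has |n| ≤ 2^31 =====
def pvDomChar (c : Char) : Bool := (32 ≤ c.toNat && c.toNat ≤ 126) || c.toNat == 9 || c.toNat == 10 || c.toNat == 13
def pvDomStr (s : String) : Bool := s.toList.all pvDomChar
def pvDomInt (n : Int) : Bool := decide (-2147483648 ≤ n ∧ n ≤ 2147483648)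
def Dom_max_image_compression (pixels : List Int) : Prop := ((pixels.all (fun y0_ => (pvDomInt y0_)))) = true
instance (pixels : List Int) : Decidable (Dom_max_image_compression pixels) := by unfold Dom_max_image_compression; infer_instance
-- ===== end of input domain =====

-- B replaces A's three passes over prefix/suffix-max arrays by a single converging
-- two-pointer scan with running maxima (alternative algorithm, O(1) extra space);
-- both raise IndexError on the empty list, which Pre_ excludes.

-- ===== PORT A =====
-- body of A's first for-loop: left_max[i] = max(left_max[i-1], pixels[i])
def pvStepL (pixels lm : List Int) (i : Int) : List Int :=
  PySem.List.pySetD lm i (max (PySem.List.pyGetD lm (i - 1) 0) (PySem.List.pyGetD pixels i 0))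

-- body of A's second for-loop: right_max[i] = max(right_max[i+1], pixels[i])
def pvStepR (pixels rm : List Int) (i : Int) : List Int :=
  PySem.List.pySetD rm i (max (PySem.List.pyGetD rm (i + 1) 0) (PySem.List.pyGetD pixels i 0))

-- left_max = [0]*n; left_max[0] = pixels[0]; for i in range(1, n): …
def pvLeftArr (pixels : List Int) : List Int :=
  (PySem.List.pyRange 1 (pixels.length : Int) 1).foldl (pvStepL pixels)
    (PySem.List.pySetD (List.replicate pixels.length 0) 0 (PySem.List.pyGetD pixels 0 0))

-- right_max = [0]*n; right_max[n-1] = pixels[n-1]; for i in range(n-2, -1, -1): …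
def pvRightArr (pixels : List Int) : List Int :=
  (PySem.List.pyRange ((pixels.length : Int) - 2) (-1) (-1)).foldl (pvStepR pixels)
    (PySem.List.pySetD (List.replicate pixels.length 0) ((pixels.length : Int) - 1)
      (PySem.List.pyGetD pixels ((pixels.length : Int) - 1) 0))

-- final loop: for i in range(n): max_compression = max(max_compression, min(l[i], r[i]) * i)
def max_image_compression (pixels : List Int) : Int :=
  (PySem.List.pyRange 0 (pixels.length : Int) 1).foldl
    (fun mc i =>
      max mc (min (PySem.List.pyGetD (pvLeftArr pixels) i 0)
        (PySem.List.pyGetD (pvRightArr pixels) i 0) * i)) 0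

-- ===== PORT B =====
-- B's while-loop: l, r pointers, running maxima, tracked best
def pvTwoPtr (pixels : List Int) (l r : Nat) (lrun rrun best : Int) : Int :=
  if _h : l < r then
    if lrun ≤ rrun then
      pvTwoPtr pixels (l + 1) r (max lrun (PySem.List.pyGetD pixels ((l : Int) + 1) 0)) rrun
        (max best (lrun * l))
    else
      pvTwoPtr pixels l (r - 1) lrun (max rrun (PySem.List.pyGetD pixels ((r : Int) - 1) 0))
        (max best (rrun * r))
  else max best (min lrun rrun * l)
termination_by r - l
decreasing_by all_goals omega

def max_image_compression_alt (pixels : List Int) : Int :=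
  let n := pixels.length
  pvTwoPtr pixels 0 (n - 1) (PySem.List.pyGetD pixels 0 0)
    (PySem.List.pyGetD pixels ((n : Int) - 1) 0) 0

-- ===== PRECONDITION & SPEC =====
-- A indexes the first element up front, so it raises IndexError on the empty list; Pre_ excludes exactly that.
def Pre_max_image_compression (pixels : List Int) : Prop := pixels ≠ []
instance (pixels : List Int) : Decidable (Pre_max_image_compression pixels) := by
  unfold Pre_max_image_compression; infer_instance

def pvWitness_max_image_compression : List Int := [3, 1, 4, 1, 5]

def Spec_max_image_compression (pixels : List Int) (out : Int) : Prop :=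
  out = max_image_compression_alt pixels
instance (pixels : List Int) (out : Int) : Decidable (Spec_max_image_compression pixels out) := by
  unfold Spec_max_image_compression; infer_instance

-- ===== CLAIM (what is proved, stated in full; the proofs are below) =====
def Claim_equal_max_image_compression : Prop := ∀ (pixels : List Int), Dom_max_image_compression pixels → Pre_max_image_compression pixels → Spec_max_image_compression pixels (max_image_compression pixels)

-- ===== LEMMAS AND PROOFS =====

-- prefix maximum: Pm pixels i = max of pixels[0..i]
def Pm (pixels : List Int) : Nat → Int
  | 0 => pixels.getD 0 0
  | i + 1 => max (Pm pixels i) (pixels.getD (i + 1) 0)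

-- suffix maximum, indexed by distance from the right end
def SmA (pixels : List Int) : Nat → Int
  | 0 => pixels.getD (pixels.length - 1) 0
  | k + 1 => max (SmA pixels k) (pixels.getD (pixels.length - 1 - (k + 1)) 0)

-- suffix maximum: Sm pixels i = max of pixels[i..n-1]
def Sm (pixels : List Int) (i : Nat) : Int := SmA pixels (pixels.length - 1 - i)

-- the per-index value both programs maximise
def Vf (pixels : List Int) (i : Nat) : Int := min (Pm pixels i) (Sm pixels i) * i

-- running maximum of Vf over indices l, l+1, …, l+len-1 starting from best
def Ff (pixels : List Int) (l len : Nat) (best : Int) : Int :=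
  (List.range' l len).foldl (fun b i => max b (Vf pixels i)) best

theorem Pm_mono (pixels : List Int) {i j : Nat} (h : i ≤ j) : Pm pixels i ≤ Pm pixels j := by
  induction j with
  | zero =>
    have : i = 0 := by omega
    subst this; exact le_rfl
  | succ j ih =>
    rcases Nat.lt_or_ge i (j + 1) with hlt | hge
    · exact le_trans (ih (by omega)) (le_max_left _ _)
    · have : i = j + 1 := by omega
      subst this; exact le_rfl

theorem SmA_mono (pixels : List Int) {k k' : Nat} (h : k ≤ k') : SmA pixels k ≤ SmA pixels k' := by
  induction k' with
  | zero =>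
    have : k = 0 := by omega
    subst this; exact le_rfl
  | succ k' ih =>
    rcases Nat.lt_or_ge k (k' + 1) with hlt | hge
    · exact le_trans (ih (by omega)) (le_max_left _ _)
    · have : k = k' + 1 := by omega
      subst this; exact le_rfl

theorem Sm_anti (pixels : List Int) {i j : Nat} (h : i ≤ j) : Sm pixels j ≤ Sm pixels i :=
  SmA_mono pixels (by omega)

theorem Sm_rec (pixels : List Int) {i : Nat} (h : i + 1 ≤ pixels.length - 1) :
    Sm pixels i = max (Sm pixels (i + 1)) (pixels.getD i 0) := by
  have h1 : pixels.length - 1 - i = (pixels.length - 1 - (i + 1)) + 1 := by omega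
  have h2 : pixels.length - 1 - ((pixels.length - 1 - (i + 1)) + 1) = i := by omega
  unfold Sm
  rw [h1]
  simp [SmA, h2]

theorem Sm_last (pixels : List Int) :
    Sm pixels (pixels.length - 1) = pixels.getD (pixels.length - 1) 0 := by
  unfold Sm
  simp [SmA]

-- foldl of max commutes with max in the seed
theorem foldMax_swap (pixels : List Int) (L : List Nat) (best x : Int) :
    L.foldl (fun b i => max b (Vf pixels i)) (max best x)
      = max (L.foldl (fun b i => max b (Vf pixels i)) best) x := by
  induction L generalizing best with
  | nil => rfl
  | cons a L ih =>
    simp only [List.foldl_cons]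
    rw [max_right_comm, ih]

theorem Ff_cons (pixels : List Int) (l k : Nat) (best : Int) :
    Ff pixels l (k + 1) best = Ff pixels (l + 1) k (max best (Vf pixels l)) := by
  unfold Ff
  rw [List.range'_succ]
  rfl

theorem Ff_concat (pixels : List Int) (l k : Nat) (best : Int) :
    Ff pixels l (k + 1) best = Ff pixels l k (max best (Vf pixels (l + k))) := by
  unfold Ff
  rw [List.range'_1_concat, foldMax_swap, List.foldl_append]
  simp [List.foldl]

-- ===== the two-pointer loop computes Ff =====
theorem twoPtr_eq (pixels : List Int) :
    ∀ d l r, r - l = d → l ≤ r → r ≤ pixels.length - 1 → ∀ best,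
      pvTwoPtr pixels l r (Pm pixels l) (Sm pixels r) best
        = Ff pixels l (r + 1 - l) best := by
  intro d
  induction d with
  | zero =>
    intro l r hd hlr hr best
    have : l = r := by omega
    subst this
    rw [pvTwoPtr]
    simp only [lt_self_iff_false, dite_false]
    have : l + 1 - l = 1 := by omega
    rw [this]
    unfold Ff Vf
    simp [List.range'_one]
  | succ d ih =>
    intro l r hd hlr hr best
    have hlr' : l < r := by omega
    rw [pvTwoPtr]
    simp only [hlr', dite_true]
    by_cases hcmp : Pm pixels l ≤ Sm pixels r
    · simp only [hcmp, if_true]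
      have hgd : PySem.List.pyGetD pixels ((l : Int) + 1) 0 = pixels.getD (l + 1) 0 := by
        have : ((l : Int) + 1) = ((l + 1 : Nat) : Int) := by push_cast; ring
        rw [this, PySem.List.pyGetD_natCast]
      have hP : max (Pm pixels l) (PySem.List.pyGetD pixels ((l : Int) + 1) 0)
          = Pm pixels (l + 1) := by
        rw [hgd]; rfl
      have hV : Pm pixels l * l = Vf pixels l := by
        unfold Vf
        have := Sm_anti pixels (le_of_lt hlr')
        have : min (Pm pixels l) (Sm pixels l) = Pm pixels l := by omega
        rw [this]
      rw [hP, hV]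
      rw [ih (l + 1) r (by omega) (by omega) hr (max best (Vf pixels l))]
      have hk : r + 1 - l = (r - l - 1) + 1 + 1 := by omega
      have hk2 : r + 1 - (l + 1) = (r - l - 1) + 1 := by omega
      conv_rhs => rw [hk, Ff_cons]
      rw [hk2]
    · simp only [hcmp, if_false]
      have hgd : PySem.List.pyGetD pixels ((r : Int) - 1) 0 = pixels.getD (r - 1) 0 := by
        have : ((r : Int) - 1) = ((r - 1 : Nat) : Int) := by omega
        rw [this, PySem.List.pyGetD_natCast]
      have hS : max (Sm pixels r) (PySem.List.pyGetD pixels ((r : Int) - 1) 0)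
          = Sm pixels (r - 1) := by
        rw [hgd]
        have hrr : (r - 1) + 1 = r := by omega
        rw [Sm_rec pixels (i := r - 1) (by omega), hrr]
      have hV : Sm pixels r * r = Vf pixels r := by
        unfold Vf
        have h1 : Pm pixels l ≤ Pm pixels r := Pm_mono pixels (by omega)
        have : min (Pm pixels r) (Sm pixels r) = Sm pixels r := by omega
        rw [this]
      rw [hS, hV]
      rw [ih l (r - 1) (by omega) (by omega) (by omega) (max best (Vf pixels r))]
      have hk : r + 1 - l = (r - l - 1) + 1 + 1 := by omega
      have hk2 : (r - 1) + 1 - l = (r - l - 1) + 1 := by omega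
      have hlk : l + ((r - l - 1) + 1) = r := by omega
      conv_rhs => rw [hk, Ff_concat, hlk]
      rw [hk2]

theorem alt_eq_Ff (pixels : List Int) (hne : pixels ≠ []) :
    max_image_compression_alt pixels = Ff pixels 0 pixels.length 0 := by
  have hn : 1 ≤ pixels.length := List.length_pos_of_ne_nil hne
  unfold max_image_compression_alt
  have h0 : PySem.List.pyGetD pixels 0 0 = Pm pixels 0 := by
    rw [PySem.List.pyGetD_zero]; rfl
  have hlast : PySem.List.pyGetD pixels ((pixels.length : Int) - 1) 0
      = Sm pixels (pixels.length - 1) := by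
    have : ((pixels.length : Int) - 1) = ((pixels.length - 1 : Nat) : Int) := by omega
    rw [this, PySem.List.pyGetD_natCast, Sm_last]
  simp only []
  rw [h0, hlast,
    twoPtr_eq pixels (pixels.length - 1) 0 (pixels.length - 1) rfl (by omega) le_rfl 0]
  congr 1
  omega

-- both array-filling folds preserve the array length
theorem length_foldl_step (step : List Int → Int → List Int)
    (hstep : ∀ arr i, (step arr i).length = arr.length) :
    ∀ (L : List Int) (arr : List Int), (L.foldl step arr).length = arr.length := by
  intro L
  induction L with
  | nil => intro arr; rfl
  | cons a L ih => intro arr; rw [List.foldl_cons, ih, hstep]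

-- ===== A's left array holds the prefix maxima =====
theorem leftFold_eq (pixels : List Int) (hn : 1 ≤ pixels.length) :
    ∀ m : Nat, 1 ≤ m → m ≤ pixels.length →
      ∀ init : List Int, init.length = pixels.length →
        PySem.List.pyGetD init 0 0 = Pm pixels 0 →
        ∀ i : Nat, i < m →
          PySem.List.pyGetD ((PySem.List.pyRange 1 (m : Int) 1).foldl (pvStepL pixels) init)
            (i : Int) 0 = Pm pixels i := by
  intro m
  induction m with
  | zero => omega
  | succ m ih =>
    intro _ hm init hlen h0 i hi
    by_cases hm0 : m = 0
    · subst hm0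
      rw [show ((0 + 1 : Nat) : Int) = 1 by norm_num, PySem.List.pyRange_one_eq_nil le_rfl]
      simp only [List.foldl_nil]
      have : i = 0 := by omega
      subst this
      exact h0
    · have hm1 : 1 ≤ m := by omega
      have hcast : (((m : Nat) + 1 : Nat) : Int) = (m : Int) + 1 := by push_cast; ring
      rw [hcast, PySem.List.pyRange_one_succ_right (by exact_mod_cast hm1), List.foldl_append]
      set arr := (PySem.List.pyRange 1 (m : Int) 1).foldl (pvStepL pixels) init with harr
      have hlenarr : arr.length = pixels.length := by
        rw [harr, length_foldl_step (pvStepL pixels)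
          (fun a j => by unfold pvStepL; exact PySem.List.length_pySetD a j _), hlen]
      have hIH : ∀ j : Nat, j < m → PySem.List.pyGetD arr (j : Int) 0 = Pm pixels j :=
        fun j hj => ih hm1 (by omega) init hlen h0 j hj
      simp only [List.foldl_cons, List.foldl_nil]
      unfold pvStepL
      have hmlt : m < arr.length := by omega
      rw [PySem.List.pyGetD_pySetD_natCast arr m i _ 0 hmlt]
      by_cases hij : i = m
      · subst hij
        rw [if_pos rfl]
        have hprev : ((i : Int) - 1) = ((i - 1 : Nat) : Int) := by omega
        rw [hprev, hIH (i - 1) (by omega), PySem.List.pyGetD_natCast]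
        have hsucc : i = (i - 1) + 1 := by omega
        rw [hsucc]
        rfl
      · rw [if_neg hij]
        exact hIH i (by omega)

-- ===== A's right array holds the suffix maxima =====
theorem rightFold_eq (pixels : List Int) (_hn : 1 ≤ pixels.length) :
    ∀ k : Nat, k ≤ pixels.length - 1 →
      ∀ arr : List Int, arr.length = pixels.length →
        (∀ i : Nat, k ≤ i → i ≤ pixels.length - 1 →
          PySem.List.pyGetD arr (i : Int) 0 = Sm pixels i) →
        ∀ i : Nat, i ≤ pixels.length - 1 →
          PySem.List.pyGetD ((PySem.List.pyRange ((k : Int) - 1) (-1) (-1)).foldl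
            (pvStepR pixels) arr) (i : Int) 0 = Sm pixels i := by
  intro k
  induction k with
  | zero =>
    intro _ arr hlen hinv i hi
    rw [show ((0 : Nat) : Int) - 1 = (-1 : Int) by norm_num,
      PySem.List.pyRange_neg_one_eq_nil le_rfl]
    exact hinv i (by omega) hi
  | succ k ih =>
    intro hk arr hlen hinv i hi
    have hcast : (((k : Nat) + 1 : Nat) : Int) - 1 = (k : Int) := by push_cast; ring
    rw [hcast, PySem.List.pyRange_neg_one_cons (by omega : (-1 : Int) < (k : Int))]
    simp only [List.foldl_cons]
    set arr' := pvStepR pixels arr (k : Int) with harr'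
    have hlen' : arr'.length = pixels.length := by
      rw [harr']; unfold pvStepR; rw [PySem.List.length_pySetD]; exact hlen
    have hinv' : ∀ j : Nat, k ≤ j → j ≤ pixels.length - 1 →
        PySem.List.pyGetD arr' (j : Int) 0 = Sm pixels j := by
      intro j hj1 hj2
      rw [harr']; unfold pvStepR
      have hkl : k < arr.length := by omega
      rw [PySem.List.pyGetD_pySetD_natCast arr k j _ 0 hkl]
      by_cases hjk : j = k
      · subst hjk
        rw [if_pos rfl]
        have h1 : ((j : Int) + 1) = ((j + 1 : Nat) : Int) := by push_cast; ring
        rw [h1, hinv (j + 1) (by omega) (by omega), PySem.List.pyGetD_natCast]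
        conv_rhs => rw [Sm_rec pixels (by omega : j + 1 ≤ pixels.length - 1)]
      · rw [if_neg hjk]
        exact hinv j (by omega) hj2
    exact ih (by omega) arr' hlen' hinv' i hi

theorem pvLeftArr_eq (pixels : List Int) (hn : 1 ≤ pixels.length) :
    ∀ i : Nat, i < pixels.length →
      PySem.List.pyGetD (pvLeftArr pixels) (i : Int) 0 = Pm pixels i := by
  intro i hi
  unfold pvLeftArr
  refine leftFold_eq pixels hn pixels.length hn le_rfl _ ?_ ?_ i hi
  · rw [PySem.List.length_pySetD, List.length_replicate]
  · have hlt : (0 : Nat) < (List.replicate pixels.length (0 : Int)).length := by simpa using hn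
    have h := PySem.List.pyGetD_pySetD_natCast (List.replicate pixels.length (0 : Int)) 0 0
      (PySem.List.pyGetD pixels 0 0) 0 hlt
    simp only [Nat.cast_zero, if_pos] at h
    rw [h, PySem.List.pyGetD_zero]
    rfl

theorem pvRightArr_eq (pixels : List Int) (hn : 1 ≤ pixels.length) :
    ∀ i : Nat, i < pixels.length →
      PySem.List.pyGetD (pvRightArr pixels) (i : Int) 0 = Sm pixels i := by
  intro i hi
  unfold pvRightArr
  have hstart : ((pixels.length : Int) - 2) = (((pixels.length - 1 : Nat) : Int) - 1) := by omega
  have hidx : ((pixels.length : Int) - 1) = ((pixels.length - 1 : Nat) : Int) := by omega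
  rw [hstart, hidx]
  refine rightFold_eq pixels hn (pixels.length - 1) le_rfl _ ?_ ?_ i (by omega)
  · rw [PySem.List.length_pySetD, List.length_replicate]
  · intro j hj1 hj2
    have hj : j = pixels.length - 1 := by omega
    subst hj
    rw [PySem.List.pyGetD_pySetD_natCast (List.replicate pixels.length 0) (pixels.length - 1) _ _ 0
      (by simp; omega)]
    rw [if_pos rfl, PySem.List.pyGetD_natCast, Sm_last]

theorem max_image_compression_eq_Ff (pixels : List Int) (hne : pixels ≠ []) :
    max_image_compression pixels = Ff pixels 0 pixels.length 0 := by
  have hn : 1 ≤ pixels.length := List.length_pos_of_ne_nil hne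
  unfold max_image_compression
  rw [PySem.List.pyRange_one 0 (pixels.length : Int), List.foldl_map]
  have htn : (((pixels.length : Int)) - 0).toNat = pixels.length := by omega
  rw [htn]
  rw [PySem.List.foldl_congr_mem (List.range pixels.length) _
    (fun b i => max b (Vf pixels i)) 0 ?_]
  · unfold Ff
    rw [List.range_eq_range']
  · intro acc x hx
    have hxlt : x < pixels.length := List.mem_range.mp hx
    rw [show (0 : Int) + (x : Int) = (x : Int) by ring]
    rw [pvLeftArr_eq pixels hn x hxlt, pvRightArr_eq pixels hn x hxlt]
    rfl

-- ===== VERDICT (by name: the statement is the Claim_ definition above) =====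
theorem max_image_compression_spec : Claim_equal_max_image_compression := by
  intro pixels _ hpre
  unfold Spec_max_image_compression
  rw [max_image_compression_eq_Ff pixels hpre, alt_eq_Ff pixels hpre]
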